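-- pv_equiv track=rewrite | github.com/Mr-cmd7/labs-work-python | lab-1-var-9/exp_4.py | count_strikes
-- ===== SOURCE A (Python) =====
-- def count_strikes(N, K, schedules):
--     if len(schedules) != K:
--         raise ValueError("Количество графиков забастовок не соответствует K.")
--
--     strikes = set()
--
--     for a, b in schedules:
--         day = a
--         while day <= N:
--             if day % 7 != 6 and day % 7 != 0:  # Суббота - 6, Воскресенье - 0
--                 strikes.add(day)
--             day += b
--
--     return len(strikes)
-- ===== SOURCE B (Python) =====
-- def count_strikes(N, K, schedules):
--     if len(schedules) != K:
--         raise ValueError("Количество графиков забастовок не соответствует K.")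
--
--     # sort-then-scan: collect all strike days, sort, count distinct weekday days in one pass
--     days = sorted(d for a, b in schedules if a <= N for d in range(a, N + 1, b))
--     count = 0
--     prev = None
--     for d in days:
--         if d != prev and d % 7 not in (0, 6):
--             count += 1
--         prev = d
--     return count
-- ===== Notes on version B (the rewrite author's own statement) =====
-- stated objective: alternative
-- what changed: A generates each progression with a while-loop, filtering weekdays into a set and returning its size; B collects all progression terms via ranges, sorts them, and counts distinct weekday values in one linear scan over the sorted list (sort-then-scan dedup instead of hash-set dedup).
import Mathlib
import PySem

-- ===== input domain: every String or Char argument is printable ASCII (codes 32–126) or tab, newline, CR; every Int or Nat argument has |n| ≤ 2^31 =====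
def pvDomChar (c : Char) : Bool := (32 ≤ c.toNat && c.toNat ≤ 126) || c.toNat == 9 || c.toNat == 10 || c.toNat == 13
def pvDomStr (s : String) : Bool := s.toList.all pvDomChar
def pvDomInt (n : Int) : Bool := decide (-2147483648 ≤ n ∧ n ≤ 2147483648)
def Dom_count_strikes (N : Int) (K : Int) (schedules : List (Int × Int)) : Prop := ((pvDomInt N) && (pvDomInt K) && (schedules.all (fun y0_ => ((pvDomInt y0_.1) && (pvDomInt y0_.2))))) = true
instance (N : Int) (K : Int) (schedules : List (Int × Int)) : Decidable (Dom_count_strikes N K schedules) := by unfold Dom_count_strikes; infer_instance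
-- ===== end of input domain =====

-- B replaces A's while-loop generation into a hash set by collecting all progression
-- terms, sorting them, and counting distinct weekday values in one scan (alternative
-- algorithm of similar cost; return-value equivalence on Pre_).

-- ===== PORT A =====
-- inner 'while day <= N' loop; the fuel (N - day + 1).toNat bounds the number of
-- iterations whenever the step b is ≥ 1 (the only case Pre_ admits with day ≤ N)
def pvStrikeLoop (N b : Int) : Nat → Int → PySem.Set Int → PySem.Set Int
  | 0, _, s => s
  | fuel+1, day, s =>
    if day ≤ N then
      pvStrikeLoop N b fuel (day + b)
        (if PySem.Int.mod day 7 ≠ 6 ∧ PySem.Int.mod day 7 ≠ 0 then PySem.Set.add s day else s)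
    else s

def count_strikes (N : Int) (K : Int) (schedules : List (Int × Int)) : Int :=
  if (schedules.length : Int) ≠ K then 0  -- Python raises ValueError here; excluded by Pre_
  else
    PySem.Set.len
      (schedules.foldl (fun s ab => pvStrikeLoop N ab.2 (N - ab.1 + 1).toNat ab.1 s)
        PySem.Set.empty)

-- ===== PORT B =====
def count_strikes_alt (N : Int) (K : Int) (schedules : List (Int × Int)) : Int :=
  if (schedules.length : Int) ≠ K then 0  -- Python raises ValueError here; excluded by Pre_
  else
    let days := PySem.List.sorted
      (schedules.flatMap (fun ab =>
        if ab.1 ≤ N then PySem.List.pyRange ab.1 (N + 1) ab.2 else []))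
      (fun d => d)
    (days.foldl
      (fun cp d =>
        (if some d ≠ cp.2 ∧ PySem.Int.mod d 7 ≠ 0 ∧ PySem.Int.mod d 7 ≠ 6 then cp.1 + 1
         else cp.1,
         some d))
      ((0 : Int), (none : Option Int))).1

-- ===== PRECONDITION & SPEC =====
-- Pre_ excludes exactly the inputs where the Python A does not return: len(schedules) != K
-- (ValueError) and any schedule with a ≤ N and step b ≤ 0 (the while-loop never terminates).
def Pre_count_strikes (N : Int) (K : Int) (schedules : List (Int × Int)) : Prop :=
  (schedules.length : Int) = K ∧ ∀ ab ∈ schedules, ab.1 ≤ N → 1 ≤ ab.2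

instance (N : Int) (K : Int) (schedules : List (Int × Int)) : Decidable (Pre_count_strikes N K schedules) := by unfold Pre_count_strikes; infer_instance

def pvWitness_count_strikes : Int × Int × (List (Int × Int)) := (10, 2, [(1, 2), (-3, 7)])

def Spec_count_strikes (N : Int) (K : Int) (schedules : List (Int × Int)) (out : Int) : Prop := out = count_strikes_alt N K schedules
instance (N : Int) (K : Int) (schedules : List (Int × Int)) (out : Int) : Decidable (Spec_count_strikes N K schedules out) := by unfold Spec_count_strikes; infer_instance

-- ===== CLAIM (what is proved, stated in full; the proofs are below) =====
def Claim_equal_count_strikes : Prop := ∀ (N : Int) (K : Int) (schedules : List (Int × Int)), Dom_count_strikes N K schedules → Pre_count_strikes N K schedules → Spec_count_strikes N K schedules (count_strikes N K schedules)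

-- ===== LEMMAS AND PROOFS =====

-- a day x is hit by schedule ab = (a, b) (weekday test kept separate)
def pvReach (N : Int) (ab : Int × Int) (x : Int) : Prop :=
  ab.1 ≤ x ∧ x ≤ N ∧ ab.2 ∣ x - ab.1

theorem pvStrikeLoop_nodup (N b : Int) :
    ∀ (fuel : Nat) (day : Int) (s : PySem.Set Int), s.Nodup → (pvStrikeLoop N b fuel day s).Nodup := by
  intro fuel
  induction fuel with
  | zero => intro day s h; simpa [pvStrikeLoop] using h
  | succ n ih =>
    intro day s h
    simp only [pvStrikeLoop]
    split_ifs with h1 h2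
    · exact ih _ _ (PySem.Set.nodup_add s day h)
    · exact ih _ _ h
    · exact h

theorem pvStrikeLoop_mem (N b : Int) (hb : 1 ≤ b) :
    ∀ (fuel : Nat) (day : Int) (s : PySem.Set Int), (N - day + 1).toNat ≤ fuel → ∀ x,
      (x ∈ pvStrikeLoop N b fuel day s ↔
        x ∈ s ∨ (day ≤ x ∧ x ≤ N ∧ b ∣ x - day ∧ (PySem.Int.mod x 7 ≠ 6 ∧ PySem.Int.mod x 7 ≠ 0))) := by
  intro fuel
  induction fuel with
  | zero =>
    intro day s hf x
    simp only [pvStrikeLoop]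
    constructor
    · exact Or.inl
    · rintro (h | ⟨h1, h2, _, _⟩)
      · exact h
      · omega
  | succ n ih =>
    intro day s hf x
    by_cases hday : day ≤ N
    · simp only [pvStrikeLoop, if_pos hday]
      rw [ih (day + b) _ (by omega) x]
      by_cases hw : PySem.Int.mod day 7 ≠ 6 ∧ PySem.Int.mod day 7 ≠ 0
      · rw [if_pos hw, PySem.Set.mem_add]
        constructor
        · rintro ((h | rfl) | ⟨h1, h2, h3, h4⟩)
          · exact Or.inl h
          · exact Or.inr ⟨le_refl _, hday, ⟨0, by ring⟩, hw⟩
          · refine Or.inr ⟨by omega, h2, ?_, h4⟩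
            obtain ⟨k, hk⟩ := h3
            exact ⟨k + 1, by linarith⟩
        · rintro (h | ⟨h1, h2, h3, h4⟩)
          · exact Or.inl (Or.inl h)
          · by_cases hxd : x = day
            · exact Or.inl (Or.inr hxd)
            · have hlt : 0 < x - day := by omega
              have hble : b ≤ x - day := Int.le_of_dvd hlt h3
              refine Or.inr ⟨by omega, h2, ?_, h4⟩
              have h5 : b ∣ (x - day) - b := dvd_sub h3 dvd_rfl
              have he : x - (day + b) = (x - day) - b := by ring
              rw [he]; exact h5
      · rw [if_neg hw]
        constructor
        · rintro (h | ⟨h1, h2, h3, h4⟩)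
          · exact Or.inl h
          · refine Or.inr ⟨by omega, h2, ?_, h4⟩
            obtain ⟨k, hk⟩ := h3
            exact ⟨k + 1, by linarith⟩
        · rintro (h | ⟨h1, h2, h3, h4⟩)
          · exact Or.inl h
          · by_cases hxd : x = day
            · subst hxd; exact absurd h4 hw
            · have hlt : 0 < x - day := by omega
              have hble : b ≤ x - day := Int.le_of_dvd hlt h3
              refine Or.inr ⟨by omega, h2, ?_, h4⟩
              have h5 : b ∣ (x - day) - b := dvd_sub h3 dvd_rfl
              have he : x - (day + b) = (x - day) - b := by ring
              rw [he]; exact h5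
    · simp only [pvStrikeLoop, if_neg hday]
      constructor
      · exact Or.inl
      · rintro (h | ⟨h1, h2, _, _⟩)
        · exact h
        · omega

theorem pvFold_nodup (N : Int) :
    ∀ (l : List (Int × Int)) (s : PySem.Set Int), s.Nodup →
      (l.foldl (fun s ab => pvStrikeLoop N ab.2 (N - ab.1 + 1).toNat ab.1 s) s).Nodup := by
  intro l
  induction l with
  | nil => intro s h; simpa using h
  | cons ab t ih =>
    intro s h
    simp only [List.foldl_cons]
    exact ih _ (pvStrikeLoop_nodup N ab.2 _ ab.1 s h)

theorem pvFold_mem (N : Int) :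
    ∀ (l : List (Int × Int)) (s : PySem.Set Int), (∀ ab ∈ l, ab.1 ≤ N → 1 ≤ ab.2) → ∀ x,
      (x ∈ l.foldl (fun s ab => pvStrikeLoop N ab.2 (N - ab.1 + 1).toNat ab.1 s) s ↔
        x ∈ s ∨ ∃ ab ∈ l, pvReach N ab x ∧ (PySem.Int.mod x 7 ≠ 6 ∧ PySem.Int.mod x 7 ≠ 0)) := by
  intro l
  induction l with
  | nil => intro s h x; simp
  | cons ab t ih =>
    intro s h x
    simp only [List.foldl_cons]
    rw [ih _ (fun c hc hN => h c (List.mem_cons_of_mem _ hc) hN) x]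
    rw [List.exists_mem_cons_iff]
    by_cases ha : ab.1 ≤ N
    · rw [pvStrikeLoop_mem N ab.2 (h ab List.mem_cons_self ha) _ ab.1 s (le_refl _) x]
      unfold pvReach
      tauto
    · have hz : (N - ab.1 + 1).toNat = 0 := by omega
      rw [hz]
      simp only [pvStrikeLoop]
      have hr : ¬ (pvReach N ab x ∧ (PySem.Int.mod x 7 ≠ 6 ∧ PySem.Int.mod x 7 ≠ 0)) := by
        rintro ⟨⟨h1, h2, _⟩, _⟩; omega
      tauto

theorem pvDays_mem (N : Int) (l : List (Int × Int)) (h : ∀ ab ∈ l, ab.1 ≤ N → 1 ≤ ab.2) (x : Int) :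
    (x ∈ l.flatMap (fun ab => if ab.1 ≤ N then PySem.List.pyRange ab.1 (N + 1) ab.2 else []) ↔
      ∃ ab ∈ l, pvReach N ab x) := by
  simp only [List.mem_flatMap]
  unfold pvReach
  constructor
  · rintro ⟨ab, hab, hx⟩
    by_cases ha : ab.1 ≤ N
    · rw [if_pos ha, PySem.List.mem_pyRange_iff_of_pos (by have := h ab hab ha; omega)] at hx
      exact ⟨ab, hab, hx.1, by omega, hx.2.2⟩
    · rw [if_neg ha] at hx
      simp at hx
  · rintro ⟨ab, hab, h1, h2, h3⟩
    have ha : ab.1 ≤ N := le_trans h1 h2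
    refine ⟨ab, hab, ?_⟩
    rw [if_pos ha, PySem.List.mem_pyRange_iff_of_pos (by have := h ab hab ha; omega)]
    exact ⟨h1, by omega, h3⟩

theorem pvScan_some :
    ∀ (S : List Int), S.Pairwise (· ≤ ·) → ∀ (p c : Int), (∀ x ∈ S, p ≤ x) →
      (S.foldl
        (fun cp d =>
          (if some d ≠ cp.2 ∧ PySem.Int.mod d 7 ≠ 0 ∧ PySem.Int.mod d 7 ≠ 6 then cp.1 + 1
           else cp.1,
           some d))
        (c, some p)).1 =
      c + (((S.filter (fun d => decide (PySem.Int.mod d 7 ≠ 6 ∧ PySem.Int.mod d 7 ≠ 0))).toFinset).erase p).card := by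
  intro S
  induction S with
  | nil => intro _ p c _; simp
  | cons d rest ih =>
    intro hS p c hp
    obtain ⟨hd, hrest⟩ := List.pairwise_cons.mp hS
    simp only [List.foldl_cons]
    by_cases hdp : d = p
    · subst hdp
      rw [if_neg (by simp)]
      rw [ih hrest d c hd]
      by_cases hw : (PySem.Int.mod d 7 ≠ 6 ∧ PySem.Int.mod d 7 ≠ 0)
      · rw [List.filter_cons_of_pos (by simpa using hw), List.toFinset_cons,
            Finset.erase_insert_eq_erase]
      · rw [List.filter_cons_of_neg (by simpa using hw)]
    · have hplt : p < d := lt_of_le_of_ne (hp d List.mem_cons_self) (Ne.symm hdp)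
      have hpnot : p ∉ ((d :: rest).filter (fun x => decide (PySem.Int.mod x 7 ≠ 6 ∧ PySem.Int.mod x 7 ≠ 0))).toFinset := by
        intro hmem
        rw [List.mem_toFinset, List.mem_filter] at hmem
        rcases List.mem_cons.mp hmem.1 with h1 | h1
        · exact hdp (h1.symm)
        · exact absurd (hd p h1) (by omega)
      rw [Finset.erase_eq_self.mpr hpnot]
      by_cases hw : (PySem.Int.mod d 7 ≠ 6 ∧ PySem.Int.mod d 7 ≠ 0)
      · rw [if_pos ⟨by simpa using hdp, hw.2, hw.1⟩]
        rw [ih hrest d (c + 1) hd]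
        rw [List.filter_cons_of_pos (by simpa using hw), List.toFinset_cons]
        have hmemd : d ∈ insert d ((rest.filter (fun x => decide (PySem.Int.mod x 7 ≠ 6 ∧ PySem.Int.mod x 7 ≠ 0))).toFinset) :=
          Finset.mem_insert_self d _
        have := Finset.card_erase_add_one hmemd
        rw [Finset.erase_insert_eq_erase] at this
        omega
      · rw [if_neg (by tauto)]
        rw [ih hrest d c hd]
        rw [List.filter_cons_of_neg (by simpa using hw)]
        have hdnot : d ∉ (rest.filter (fun x => decide (PySem.Int.mod x 7 ≠ 6 ∧ PySem.Int.mod x 7 ≠ 0))).toFinset := by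
          intro hmem
          rw [List.mem_toFinset, List.mem_filter] at hmem
          exact hw (by simpa using hmem.2)
        rw [Finset.erase_eq_self.mpr hdnot]

theorem pvScan_none (S : List Int) (hS : S.Pairwise (· ≤ ·)) (c : Int) :
    (S.foldl
      (fun cp d =>
        (if some d ≠ cp.2 ∧ PySem.Int.mod d 7 ≠ 0 ∧ PySem.Int.mod d 7 ≠ 6 then cp.1 + 1
         else cp.1,
         some d))
      (c, (none : Option Int))).1 =
    c + ((S.filter (fun d => decide (PySem.Int.mod d 7 ≠ 6 ∧ PySem.Int.mod d 7 ≠ 0))).toFinset).card := by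
  cases S with
  | nil => simp
  | cons d rest =>
    obtain ⟨hd, hrest⟩ := List.pairwise_cons.mp hS
    simp only [List.foldl_cons]
    by_cases hw : (PySem.Int.mod d 7 ≠ 6 ∧ PySem.Int.mod d 7 ≠ 0)
    · rw [if_pos ⟨by simp, hw.2, hw.1⟩]
      rw [pvScan_some rest hrest d (c + 1) hd]
      rw [List.filter_cons_of_pos (by simpa using hw), List.toFinset_cons]
      have hmemd : d ∈ insert d ((rest.filter (fun x => decide (PySem.Int.mod x 7 ≠ 6 ∧ PySem.Int.mod x 7 ≠ 0))).toFinset) :=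
        Finset.mem_insert_self d _
      have := Finset.card_erase_add_one hmemd
      rw [Finset.erase_insert_eq_erase] at this
      omega
    · rw [if_neg (by tauto)]
      rw [pvScan_some rest hrest d c hd]
      rw [List.filter_cons_of_neg (by simpa using hw)]
      have hdnot : d ∉ (rest.filter (fun x => decide (PySem.Int.mod x 7 ≠ 6 ∧ PySem.Int.mod x 7 ≠ 0))).toFinset := by
        intro hmem
        rw [List.mem_toFinset, List.mem_filter] at hmem
        exact hw (by simpa using hmem.2)
      rw [Finset.erase_eq_self.mpr hdnot]

-- ===== VERDICT (by name: the statement is the Claim_ definition above) =====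
theorem count_strikes_spec : Claim_equal_count_strikes := by
  intro N K schedules hdom hpre
  obtain ⟨hlen, hstep⟩ := hpre
  have hg : ¬ ((schedules.length : Int) ≠ K) := by omega
  unfold Spec_count_strikes count_strikes count_strikes_alt
  rw [if_neg hg, if_neg hg]
  set L := schedules.flatMap
      (fun ab => if ab.1 ≤ N then PySem.List.pyRange ab.1 (N + 1) ab.2 else []) with hL
  set S := PySem.List.sorted L (fun d => d) with hSdef
  have hpair : S.Pairwise (· ≤ ·) := by
    have := PySem.List.sorted_pairwise L (fun d => d)
    simpa using this
  dsimp only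
  rw [pvScan_none S hpair 0]
  set F := schedules.foldl (fun s ab => pvStrikeLoop N ab.2 (N - ab.1 + 1).toNat ab.1 s)
      PySem.Set.empty with hF
  have hnd : F.Nodup := pvFold_nodup N schedules PySem.Set.empty List.nodup_nil
  have hmem : ∀ x, x ∈ F ↔ ∃ ab ∈ schedules, pvReach N ab x ∧ (PySem.Int.mod x 7 ≠ 6 ∧ PySem.Int.mod x 7 ≠ 0) := by
    intro x
    rw [hF, pvFold_mem N schedules _ hstep x]
    have : x ∉ (PySem.Set.empty : PySem.Set Int) := by simp [PySem.Set.empty]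
    tauto
  have hfin : F.toFinset = (S.filter (fun d => decide (PySem.Int.mod d 7 ≠ 6 ∧ PySem.Int.mod d 7 ≠ 0))).toFinset := by
    ext x
    simp only [List.mem_toFinset, List.mem_filter, decide_eq_true_eq]
    rw [hmem x, hSdef, PySem.List.mem_sorted, pvDays_mem N schedules hstep x]
    constructor
    · rintro ⟨ab, h1, h2, h3⟩; exact ⟨⟨ab, h1, h2⟩, h3⟩
    · rintro ⟨⟨ab, h1, h2⟩, h3⟩; exact ⟨ab, h1, h2, h3⟩
  have hlenF : F.length = ((S.filter (fun d => decide (PySem.Int.mod d 7 ≠ 6 ∧ PySem.Int.mod d 7 ≠ 0))).toFinset).card := by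
    rw [← hfin, List.toFinset_card_of_nodup hnd]
  unfold PySem.Set.len
  rw [hlenF]
  omega
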